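-- pv_equiv track=rewrite | github.com/anonymweblinks/GradObliqueTree | src/treeFunc.py | get_branch_nodes
-- ===== SOURCE A (Python) =====
-- def get_branch_nodes(ind, prelayer):
--     ind -= 1
--     branchNodes = [ind]
--     current_nodes = [ind]
--     for _ in range(prelayer-1):
--         next_nodes = [2*node + j for node in current_nodes for j in [1, 2]]
--         branchNodes.extend(next_nodes)
--         current_nodes = next_nodes
--     return branchNodes
-- ===== SOURCE B (Python) =====
-- def get_branch_nodes(ind, prelayer):
--     branchNodes = [ind - 1]
--     for k in range(1, prelayer):
--         branchNodes.extend(range(ind * 2**k - 1, (ind + 1) * 2**k - 1))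
--     return branchNodes
-- ===== Notes on version B (the rewrite author's own statement) =====
-- stated objective: simpler
-- what changed: Instead of maintaining the current level's node list and doubling it (children 2n+1, 2n+2 of every node), B emits each BFS level directly as the closed-form contiguous range range(ind*2**k - 1, (ind+1)*2**k - 1), so no per-node child expansion or current_nodes state is kept.
import Mathlib
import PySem

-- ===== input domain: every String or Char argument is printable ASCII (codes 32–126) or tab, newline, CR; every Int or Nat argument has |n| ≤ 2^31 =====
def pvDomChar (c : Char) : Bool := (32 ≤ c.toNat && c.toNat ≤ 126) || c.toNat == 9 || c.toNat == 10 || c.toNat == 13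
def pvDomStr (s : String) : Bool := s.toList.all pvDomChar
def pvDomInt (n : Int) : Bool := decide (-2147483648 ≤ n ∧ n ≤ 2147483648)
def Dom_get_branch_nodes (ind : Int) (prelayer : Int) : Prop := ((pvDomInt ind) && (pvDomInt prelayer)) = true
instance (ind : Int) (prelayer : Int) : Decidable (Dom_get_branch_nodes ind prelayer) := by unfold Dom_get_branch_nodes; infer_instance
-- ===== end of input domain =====

-- B replaces A's level-doubling list (children 2n+1/2n+2 of each kept node) by the closed-form
-- contiguous range each BFS level occupies; objective: simpler.

-- ===== PORT A =====
def get_branch_nodes (ind : Int) (prelayer : Int) : List Int :=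
  let ind' := ind - 1
  let st := (PySem.List.pyRange 0 (prelayer - 1) 1).foldl
    (fun (st : List Int × List Int) _ =>
      let next := st.2.flatMap (fun node => [(1 : Int), 2].map (fun j => 2 * node + j))
      (st.1 ++ next, next))
    ([ind'], [ind'])
  st.1

-- ===== PORT B =====
def get_branch_nodes_alt (ind : Int) (prelayer : Int) : List Int :=
  (PySem.List.pyRange 1 prelayer 1).foldl
    (fun acc k =>
      acc ++ PySem.List.pyRange (ind * 2 ^ k.toNat - 1) ((ind + 1) * 2 ^ k.toNat - 1) 1)
    [ind - 1]

-- ===== PRECONDITION & SPEC =====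
def Spec_get_branch_nodes (ind : Int) (prelayer : Int) (out : List Int) : Prop := out = get_branch_nodes_alt ind prelayer
instance (ind : Int) (prelayer : Int) (out : List Int) : Decidable (Spec_get_branch_nodes ind prelayer out) := by unfold Spec_get_branch_nodes; infer_instance

-- ===== CLAIM (what is proved, stated in full; the proofs are below) =====
def Claim_equal_get_branch_nodes : Prop := ∀ (ind : Int) (prelayer : Int), Dom_get_branch_nodes ind prelayer → Spec_get_branch_nodes ind prelayer (get_branch_nodes ind prelayer)

-- ===== LEMMAS AND PROOFS =====

-- children of the contiguous block [a, b) form the contiguous block [2a+1, 2b+1)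
theorem pv_child_aux (n : Nat) : ∀ a b : Int, (b - a).toNat = n →
    (PySem.List.pyRange a b 1).flatMap (fun node => [2 * node + 1, 2 * node + 2]) =
      PySem.List.pyRange (2 * a + 1) (2 * b + 1) 1 := by
  induction n with
  | zero =>
    intro a b h
    rw [PySem.List.pyRange_one_eq_nil (by omega), PySem.List.pyRange_one_eq_nil (by omega)]
    simp
  | succ n ih =>
    intro a b h
    have hab : a < b := by omega
    rw [PySem.List.pyRange_one_cons hab,
        PySem.List.pyRange_one_cons (show 2 * a + 1 < 2 * b + 1 by omega),
        PySem.List.pyRange_one_cons (show 2 * a + 1 + 1 < 2 * b + 1 by omega)]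
    have h2 : 2 * a + 1 + 1 + 1 = 2 * (a + 1) + 1 := by ring
    simp only [List.flatMap_cons, List.cons_append, List.nil_append, h2,
      ih (a + 1) b (by omega)]
    rw [show (2 * a + 1 + 1 : Int) = 2 * a + 2 by ring]

theorem pv_child (a b : Int) :
    (PySem.List.pyRange a b 1).flatMap (fun node => [2 * node + 1, 2 * node + 2]) =
      PySem.List.pyRange (2 * a + 1) (2 * b + 1) 1 :=
  pv_child_aux (b - a).toNat a b rfl

-- joint invariant of A's fold: accumulator = B's accumulator, current level = its contiguous range
theorem pv_main (ind : Int) (n : Nat) :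
    (List.range n).foldl
        (fun (st : List Int × List Int) (_ : Nat) =>
          let next := st.2.flatMap (fun node => [(1 : Int), 2].map (fun j => 2 * node + j))
          (st.1 ++ next, next))
        ([ind - 1], [ind - 1]) =
      ((List.range n).foldl
          (fun acc j =>
            acc ++ PySem.List.pyRange (ind * 2 ^ (j + 1) - 1) ((ind + 1) * 2 ^ (j + 1) - 1) 1)
          [ind - 1],
        PySem.List.pyRange (ind * 2 ^ n - 1) ((ind + 1) * 2 ^ n - 1) 1) := by
  induction n with
  | zero =>
    simp only [List.range_zero, List.foldl_nil, pow_zero, mul_one]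
    rw [show ((ind + 1) - 1 : Int) = (ind - 1) + 1 by ring, PySem.List.pyRange_one_singleton]
  | succ n ih =>
    rw [List.range_succ, List.foldl_append, List.foldl_append, ih]
    have hmap : (fun node => [(1 : Int), 2].map (fun j => 2 * node + j)) =
        fun node : Int => [2 * node + 1, 2 * node + 2] := by funext node; simp
    simp only [List.foldl_cons, List.foldl_nil, hmap, pv_child]
    have e1 : 2 * (ind * 2 ^ n - 1) + 1 = ind * 2 ^ (n + 1) - 1 := by ring
    have e2 : 2 * ((ind + 1) * 2 ^ n - 1) + 1 = (ind + 1) * 2 ^ (n + 1) - 1 := by ring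
    rw [e1, e2]

theorem pv_altB (ind : Int) (prelayer : Int) :
    get_branch_nodes_alt ind prelayer =
      (List.range (prelayer - 1).toNat).foldl
        (fun acc j =>
          acc ++ PySem.List.pyRange (ind * 2 ^ (j + 1) - 1) ((ind + 1) * 2 ^ (j + 1) - 1) 1)
        [ind - 1] := by
  unfold get_branch_nodes_alt
  rw [PySem.List.pyRange_one, List.foldl_map]
  have : (prelayer - 1).toNat = ((prelayer : Int) - 1).toNat := rfl
  congr 1
  · funext acc j
    have : ((1 : Int) + (j : Int)).toNat = j + 1 := by omega
    rw [this]

-- ===== VERDICT (by name: the statement is the Claim_ definition above) =====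
theorem get_branch_nodes_spec : Claim_equal_get_branch_nodes := by
  intro ind prelayer _
  simp only [Spec_get_branch_nodes, get_branch_nodes]
  rw [pv_altB, PySem.List.pyRange_one, List.foldl_map]
  simp only [sub_zero]
  rw [pv_main]
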